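-- pv_equiv track=rewrite | github.com/coen0713/logic-translator | src/logic_translator/translator.py | tokenize
-- ===== SOURCE A (Python) =====
-- import string
--
-- TOKEN_MAP = {
--         "and" : "AND",
--         "or" : "OR",
--         "not" : "NOT",
--         "if" : "IF",
--         "then" : "THEN"
-- }
--
-- STOP_WORDS = {"it", "is", "the", "a", "an", "are", "was", "were"}
--
-- def tokenize(sentance):
--     sentance = sentance.lower()
--     for char in string.punctuation:
--         sentance = sentance.replace(char, "")
--
--     words = sentance.split()
--     tokens = []
--     temp_atom = []
--
--     for word in words:
--         token_type = get_token_type(word)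
--
--         if token_type == "ATOM":
--             if word not in STOP_WORDS:
--                 temp_atom.append(word)
--
--         else:
--             if temp_atom:
--                 tokens.append(("_".join(temp_atom), "ATOM"))
--                 temp_atom = []
--
--             tokens.append((word, token_type))
--
--     if temp_atom:
--         tokens.append(("_".join(temp_atom), "ATOM"))
--
--     return tokens
--
-- def get_token_type(word):
--     return TOKEN_MAP.get(word, "ATOM")
-- ===== SOURCE B (Python) =====
-- import string
--
-- TOKEN_MAP = {
--         "and" : "AND",
--         "or" : "OR",
--         "not" : "NOT",
--         "if" : "IF",
--         "then" : "THEN"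
-- }
--
-- STOP_WORDS = {"it", "is", "the", "a", "an", "are", "was", "were"}
--
-- _TABLE = str.maketrans("", "", string.punctuation)
--
-- def tokenize(sentance):
--     # Stop-words are never keywords, so they can be dropped globally up front.
--     words = [w for w in sentance.lower().translate(_TABLE).split()
--              if w not in STOP_WORDS]
--     # Index-based: find every keyword position, then slice the atom segments
--     # lying strictly between consecutive keyword positions (and the two ends).
--     cuts = [i for i, w in enumerate(words) if w in TOKEN_MAP]
--     bounds = [-1] + cuts + [len(words)]
--     tokens = []
--     for lo, hi in zip(bounds, bounds[1:]):
--         seg = words[lo + 1:hi]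
--         if seg:
--             tokens.append(("_".join(seg), "ATOM"))
--         if hi < len(words):
--             tokens.append((words[hi], TOKEN_MAP[words[hi]]))
--     return tokens
-- ===== Notes on version B (the rewrite author's own statement) =====
-- stated objective: alternative
-- what changed: B is two-phase and index-based: it drops stop-words globally up front (they are never keywords), computes the list of all keyword positions with enumerate, and then builds the tokens by slicing the atom segment between each pair of consecutive cut positions, instead of A's single fold with a temp_atom buffer and flushes; punctuation is removed by one translate pass instead of 32 replace passes.
import Mathlib
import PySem

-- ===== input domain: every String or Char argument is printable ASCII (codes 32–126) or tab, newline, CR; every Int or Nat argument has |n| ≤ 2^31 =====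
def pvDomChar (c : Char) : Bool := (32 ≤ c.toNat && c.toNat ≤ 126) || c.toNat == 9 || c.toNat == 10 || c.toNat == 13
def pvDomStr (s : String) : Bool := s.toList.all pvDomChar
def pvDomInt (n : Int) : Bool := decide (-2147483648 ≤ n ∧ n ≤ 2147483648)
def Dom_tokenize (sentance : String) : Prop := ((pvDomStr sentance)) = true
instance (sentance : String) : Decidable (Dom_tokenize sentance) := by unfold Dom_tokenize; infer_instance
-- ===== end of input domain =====

-- B replaces A's single buffer-and-flush fold by an index-based two-phase algorithm:
-- filter stop-words globally, list all keyword positions, then slice the atom segment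
-- between consecutive keyword positions; punctuation goes in one translate/filter pass.
-- Same return value, alternative decomposition.

-- ===== PORT A =====
-- string.punctuation
def PUNCT : List Char := "!\"#$%&'()*+,-./:;<=>?@[\\]^_`{|}~".toList

def TOKEN_MAP : PySem.Dict String String :=
  PySem.Dict.mk [("and", "AND"), ("or", "OR"), ("not", "NOT"), ("if", "IF"), ("then", "THEN")]

def STOP_WORDS : PySem.Set String :=
  PySem.Set.ofList ["it", "is", "the", "a", "an", "are", "was", "were"]

-- TOKEN_MAP.get(word, "ATOM")
def get_token_type (word : String) : String := TOKEN_MAP.getD word "ATOM"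

-- the body of A's `for word in words` loop, state = (tokens, temp_atom)
def tokenizeStep (st : List (String × String) × List String) (word : String) :
    List (String × String) × List String :=
  let tokens := st.1
  let temp_atom := st.2
  let token_type := get_token_type word
  if token_type = "ATOM" then
    if STOP_WORDS.contains word = false then (tokens, temp_atom ++ [word]) else (tokens, temp_atom)
  else
    let tokens := if temp_atom ≠ [] then tokens ++ [(PySem.Str.join "_" temp_atom, "ATOM")] else tokens
    (tokens ++ [(word, token_type)], [])

def tokenize (sentance : String) : List (String × String) :=
  let s1 := PySem.Str.lower sentance
  let s2 := PUNCT.foldl (fun t c => PySem.Str.replace t (String.ofList [c]) "") s1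
  let words := PySem.Str.split₀ s2
  let st := words.foldl tokenizeStep ([], [])
  if st.2 ≠ [] then st.1 ++ [(PySem.Str.join "_" st.2, "ATOM")] else st.1

-- ===== PORT B =====
-- the body of B's `for lo, hi in zip(bounds, bounds[1:])` loop
def bStep (words : List String) (tokens : List (String × String)) (p : Int × Int) :
    List (String × String) :=
  let seg := PySem.List.slice words (some (p.1 + 1)) (some p.2)
  let tokens := if seg ≠ [] then tokens ++ [(PySem.Str.join "_" seg, "ATOM")] else tokens
  if p.2 < (words.length : Int) then
    -- under this guard p.2 is a cut position: in range and a TOKEN_MAP key, so the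
    -- total pyGetD/getD forms are exact for words[hi] / TOKEN_MAP[words[hi]]
    let w := PySem.List.pyGetD words p.2 ""
    tokens ++ [(w, TOKEN_MAP.getD w "ATOM")]
  else tokens

def tokenize_alt (sentance : String) : List (String × String) :=
  -- translate(maketrans("", "", punctuation)) deletes exactly the punctuation chars (ASCII-exact here)
  let cleaned := String.ofList ((PySem.Str.lower sentance).toList.filter (fun c => !PUNCT.contains c))
  let words := (PySem.Str.split₀ cleaned).filter (fun w => !STOP_WORDS.contains w)
  let cuts := ((PySem.List.enumerate words 0).filter (fun p => TOKEN_MAP.contains p.2)).map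
    (fun p => p.1)
  let bounds := (-1 : Int) :: (cuts ++ [(words.length : Int)])
  (bounds.zip bounds.tail).foldl (bStep words) []

-- ===== PRECONDITION & SPEC =====
def Spec_tokenize (sentance : String) (out : List (String × String)) : Prop := out = tokenize_alt sentance
instance (sentance : String) (out : List (String × String)) : Decidable (Spec_tokenize sentance out) := by unfold Spec_tokenize; infer_instance

-- ===== CLAIM (what is proved, stated in full; the proofs are below) =====
def Claim_equal_tokenize : Prop := ∀ (sentance : String), Dom_tokenize sentance → Spec_tokenize sentance (tokenize sentance)

-- ===== LEMMAS AND PROOFS =====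

-- emitting a pending atom buffer
def emitRun (l : List String) : List (String × String) :=
  if l ≠ [] then [(PySem.Str.join "_" l, "ATOM")] else []

-- A's loop as a pending-buffer recursion over the already stop-word-filtered word list
def buf : List String → List String → List (String × String)
  | pend, [] => emitRun pend
  | pend, w :: ws =>
    if TOKEN_MAP.contains w then emitRun pend ++ (w, TOKEN_MAP.getD w "ATOM") :: buf [] ws
    else buf (pend ++ [w]) ws

-- keyword positions, recursively
def kwIdx : List String → List Nat
  | [] => []
  | w :: ws => (if TOKEN_MAP.contains w then [0] else []) ++ (kwIdx ws).map (· + 1)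

-- B's slice construction as a recursion over the cut list
def sliceTokens (words : List String) (lo : Nat) : List Nat → List (String × String)
  | [] => emitRun (List.take (words.length - lo) (List.drop lo words))
  | c :: cs =>
      emitRun (List.take (c - lo) (List.drop lo words)) ++
      (if (c : Int) < (words.length : Int) then
        [(PySem.List.pyGetD words (c : Int) "",
          TOKEN_MAP.getD (PySem.List.pyGetD words (c : Int) "") "ATOM")]
      else []) ++ sliceTokens words (c + 1) cs

theorem go_single (c : Char) : ∀ (l : List Char) (fuel : Nat) (acc : List Char), l.length ≤ fuel →
    PySem.Chars.replace.go [c] [] fuel l acc = acc.reverse ++ l.filter (fun x => x != c) := by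
  intro l
  induction l with
  | nil => intro fuel acc _; cases fuel <;> simp [PySem.Chars.replace.go]
  | cons x t ih =>
    intro fuel acc hle
    cases fuel with
    | zero => simp at hle
    | succ f =>
      simp only [PySem.Chars.replace.go]
      by_cases hx : c = x
      · subst hx
        simp [List.isPrefixOf, ih f acc (by simpa using hle)]
      · simp [List.isPrefixOf, hx, ih f (x :: acc) (by simpa using hle), bne,
          (by simpa using Ne.symm hx : (x == c) = false)]

theorem replace_single (c : Char) (l : List Char) :
    PySem.Chars.replace l [c] [] = l.filter (fun x => x != c) := by
  rw [PySem.Chars.replace]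
  simp [go_single c l l.length [] le_rfl]

theorem fold_replace : ∀ (ps : List Char) (s : String),
    ps.foldl (fun t c => PySem.Str.replace t (String.ofList [c]) "") s
      = String.ofList (s.toList.filter (fun x => !ps.contains x)) := by
  intro ps
  induction ps with
  | nil => intro s; simp
  | cons c ps ih =>
    intro s
    simp only [List.foldl_cons, ih]
    congr 1
    simp [PySem.Str.replace, replace_single, List.filter_filter]
    apply List.filter_congr
    intro x _
    by_cases h : x = c <;> simp [h, bne]

-- every TOKEN_MAP value differs from "ATOM"
theorem tm_some_ne_atom (w t : String) (h : TOKEN_MAP.get? w = some t) : t ≠ "ATOM" := by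
  simp only [TOKEN_MAP, PySem.Dict.get?_mk_cons] at h
  split_ifs at h <;> simp_all [PySem.Dict.get?] <;> subst h <;> decide

theorem gtt_of_some (w t : String) (h : TOKEN_MAP.get? w = some t) : get_token_type w = t := by
  simp [get_token_type, PySem.Dict.getD_eq_get?_getD, h]

theorem gtt_of_none (w : String) (h : TOKEN_MAP.get? w = none) : get_token_type w = "ATOM" := by
  simp [get_token_type, PySem.Dict.getD_eq_get?_getD, h]

-- keywords are never stop-words
theorem kw_not_stop (w : String) (h : TOKEN_MAP.contains w = true) :
    STOP_WORDS.contains w = false := by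
  rw [PySem.Dict.contains_eq_isSome_get?] at h
  simp only [TOKEN_MAP, PySem.Dict.get?_mk_cons] at h
  split_ifs at h with h1 h2 h3 h4 h5
  · have : ("and" : String) = w := by simpa using h1
    subst this; decide
  · have : ("or" : String) = w := by simpa using h2
    subst this; decide
  · have : ("not" : String) = w := by simpa using h3
    subst this; decide
  · have : ("if" : String) = w := by simpa using h4
    subst this; decide
  · have : ("then" : String) = w := by simpa using h5
    subst this; decide
  · simp [PySem.Dict.get?] at h

-- A's fold equals buf on the stop-word-filtered word list
theorem foldA_buf (ws : List String) : ∀ (tokens : List (String × String)) (temp : List String),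
    (let st := ws.foldl tokenizeStep (tokens, temp);
      if st.2 ≠ [] then st.1 ++ [(PySem.Str.join "_" st.2, "ATOM")] else st.1)
      = tokens ++ buf temp (ws.filter (fun w => !STOP_WORDS.contains w)) := by
  induction ws with
  | nil =>
    intro tokens temp
    simp [buf, emitRun]
    split_ifs <;> simp_all
  | cons w ws ih =>
    intro tokens temp
    by_cases h : TOKEN_MAP.contains w = true
    · rcases Option.isSome_iff_exists.mp
        ((PySem.Dict.contains_eq_isSome_get? TOKEN_MAP w) ▸ h) with ⟨t, ht⟩
      have hne := tm_some_ne_atom w t ht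
      have hstep : tokenizeStep (tokens, temp) w
          = (tokens ++ emitRun temp ++ [(w, t)], []) := by
        simp [tokenizeStep, gtt_of_some w t ht, hne, emitRun]
        split_ifs <;> simp_all
      have hgd : TOKEN_MAP.getD w "ATOM" = t := gtt_of_some w t ht
      simp only [List.foldl_cons, hstep, ih, List.filter_cons, kw_not_stop w h,
        Bool.not_false, if_pos, buf, h, hgd]
      simp
    · have hn : TOKEN_MAP.get? w = none := by
        have := PySem.Dict.contains_eq_isSome_get? TOKEN_MAP w
        simp [h] at this
        exact Option.not_isSome_iff_eq_none.mp (by simp [← this])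
      have hatom := gtt_of_none w hn
      by_cases hs : STOP_WORDS.contains w = false
      · have hs' : w ∉ STOP_WORDS := by simpa [PySem.Set.contains] using hs
        have hstep : tokenizeStep (tokens, temp) w = (tokens, temp ++ [w]) := by
          simp [tokenizeStep, hatom, hs']
        simp only [List.foldl_cons, hstep, ih, List.filter_cons, hs, Bool.not_false, if_pos,
          buf, h]
        simp
      · have hs'' : STOP_WORDS.contains w = true := (Bool.not_eq_false _).mp hs
        have hs' : w ∈ STOP_WORDS := by
          simpa [PySem.Set.contains] using hs''
        have hstep : tokenizeStep (tokens, temp) w = (tokens, temp) := by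
          simp [tokenizeStep, hatom, hs']
        simp only [List.foldl_cons, hstep, ih, List.filter_cons, hs'']
        simp

-- buf equals the slice construction at the keyword positions
theorem buf_slice (words : List String) : ∀ (vs : List String) (lo d : Nat), d ≤ lo →
    words.drop lo = vs →
    buf (List.drop d (List.take lo words)) vs
      = sliceTokens words d ((kwIdx vs).map (· + lo)) := by
  intro vs
  induction vs with
  | nil =>
    intro lo d _ hdrop
    have hlo : words.length ≤ lo := by
      by_contra hlt
      have := congrArg List.length hdrop
      simp at this
      omega
    simp only [buf, kwIdx, List.map_nil, sliceTokens]
    congr 1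
    rw [List.take_of_length_le hlo, List.take_of_length_le (by simp)]
  | cons w vs ih =>
    intro lo d hd hdrop
    have hlt : lo < words.length := by
      by_contra hge
      rw [List.drop_eq_nil_of_le (by omega)] at hdrop
      exact (List.cons_ne_nil _ _) hdrop.symm
    have hget : words[lo]? = some w := by
      have h0 : (List.drop lo words)[0]? = words[lo + 0]? := List.getElem?_drop
      rw [hdrop] at h0
      simpa using h0.symm
    have hdrop' : words.drop (lo + 1) = vs := by
      have h1 : List.drop 1 (List.drop lo words) = List.drop (lo + 1) words := List.drop_drop
      rw [hdrop] at h1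
      simpa using h1.symm
    have htake : List.take (lo + 1) words = List.take lo words ++ [w] := by
      rw [List.take_add_one, hget]; rfl
    by_cases h : TOKEN_MAP.contains w = true
    · have hkw : kwIdx (w :: vs) = 0 :: (kwIdx vs).map (· + 1) := by simp [kwIdx, h]
      have hfun : ((· + lo) ∘ (· + 1) : Nat → Nat) = (· + (lo + 1)) := by
        funext x; simp only [Function.comp]; omega
      have hmap : ((kwIdx (w :: vs)).map (· + lo)) = lo :: (kwIdx vs).map (· + (lo + 1)) := by
        rw [hkw]; simp only [List.map_cons, List.map_map, hfun]; simp
      rw [hmap]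
      simp only [buf, h, if_true, sliceTokens]
      have hseg : List.take (lo - d) (List.drop d words) = List.drop d (List.take lo words) := by
        rw [List.drop_take]
      have hpy : PySem.List.pyGetD words (lo : Int) "" = w := by
        rw [PySem.List.pyGetD_natCast]
        simp [List.getD, hget]
      rw [hseg, hpy]
      have hc : ((lo : Int) < (words.length : Int)) := by exact_mod_cast hlt
      rw [if_pos hc]
      have hrec := ih (lo + 1) (lo + 1) le_rfl hdrop'
      rw [htake] at hrec
      rw [List.drop_eq_nil_of_le (by simp [List.length_take])] at hrec
      rw [← hrec]
      simp
    · have hfun : ((· + lo) ∘ (· + 1) : Nat → Nat) = (· + (lo + 1)) := by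
        funext x; simp only [Function.comp]; omega
      have hkw : (kwIdx (w :: vs)).map (· + lo) = (kwIdx vs).map (· + (lo + 1)) := by
        simp only [kwIdx, h, Bool.false_eq_true]
        simp
        intro a _
        omega
      rw [hkw]
      simp only [buf, h]
      have hrec := ih (lo + 1) d (by omega) hdrop'
      rw [htake] at hrec
      rw [List.drop_append_of_le_length (by simp; omega)] at hrec
      exact hrec

-- B's zip-fold equals the slice recursion
theorem fold_slice (words : List String) : ∀ (cs : List Nat) (lo : Nat)
    (acc : List (String × String)),
    ((((lo : Int) - 1) :: (cs.map (fun c : Nat => (c : Int)) ++ [(words.length : Int)])).zip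
        ((cs.map (fun c : Nat => (c : Int)) ++ [(words.length : Int)]))).foldl (bStep words) acc
      = acc ++ sliceTokens words lo cs := by
  intro cs
  induction cs with
  | nil =>
    intro lo acc
    simp only [List.map_nil, List.nil_append, List.zip, List.zipWith_cons_cons,
      List.zipWith_nil_right, List.foldl_cons, List.foldl_nil, sliceTokens, bStep]
    rw [show ((lo : Int) - 1 + 1) = ((lo : Nat) : Int) from by ring, PySem.List.slice_natCast]
    simp only [lt_self_iff_false, if_false, emitRun]
    split_ifs <;> simp_all
  | cons c cs ih =>
    intro lo acc
    simp only [List.map_cons, List.cons_append, List.zip, List.zipWith_cons_cons,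
      List.foldl_cons]
    have hrec := ih (c + 1) (bStep words acc ((lo : Int) - 1, (c : Int)))
    simp only [List.zip] at hrec
    rw [show (((c + 1 : Nat)) : Int) - 1 = ((c : Nat) : Int) from by push_cast; ring] at hrec
    rw [hrec]
    simp only [bStep, sliceTokens]
    rw [show ((lo : Int) - 1 + 1) = ((lo : Nat) : Int) from by ring, PySem.List.slice_natCast]
    simp only [emitRun]
    split_ifs <;> simp_all

-- the enumerate/filter/map cut computation equals kwIdx
theorem enum_cuts : ∀ (ws : List String) (s : Int),
    ((PySem.List.enumerate ws s).filter (fun p => TOKEN_MAP.contains p.2)).map (fun p => p.1)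
      = (kwIdx ws).map (fun c : Nat => (c : Int) + s) := by
  intro ws
  induction ws with
  | nil => intro s; simp [PySem.List.enumerate, kwIdx]
  | cons w ws ih =>
    intro s
    rw [PySem.List.enumerate_cons]
    by_cases h : TOKEN_MAP.contains w = true
    · simp only [kwIdx, h, if_pos, List.singleton_append, List.map_cons, List.filter_cons,
        List.map_map]
      rw [ih (s + 1)]
      simp only [Nat.cast_zero, zero_add]
      congr 1
      apply List.map_congr_left
      intro x _
      simp
      ring
    · simp only [kwIdx, h, Bool.false_eq_true, if_false, List.nil_append, List.filter_cons]
      rw [ih (s + 1), List.map_map]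
      apply List.map_congr_left
      intro x _
      simp only [Function.comp_apply]
      push_cast
      ring

-- the word-list-level equivalence: A's fold = B's cut-and-slice fold
theorem core (ws : List String) :
    (let st := ws.foldl tokenizeStep ([], []);
      if st.2 ≠ [] then st.1 ++ [(PySem.Str.join "_" st.2, "ATOM")] else st.1)
    = (let words := ws.filter (fun w => !STOP_WORDS.contains w);
        let cuts := ((PySem.List.enumerate words 0).filter
          (fun p => TOKEN_MAP.contains p.2)).map (fun p => p.1);
        let bounds := (-1 : Int) :: (cuts ++ [(words.length : Int)]);
        (bounds.zip bounds.tail).foldl (bStep words) []) := by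
  show _ = ((((-1 : Int) :: _) ).zip _).foldl _ _
  rw [List.tail_cons, foldA_buf, enum_cuts]
  set fw := ws.filter (fun w => !STOP_WORDS.contains w) with hfw
  have h0 : (kwIdx fw).map (fun c : Nat => ((c : Int) + 0)) = (kwIdx fw).map (fun c : Nat => (c : Int)) := by
    apply List.map_congr_left; intro x _; ring
  rw [h0]
  have hmain := fold_slice fw (kwIdx fw) 0 []
  simp only [Nat.cast_zero, zero_sub, List.nil_append] at hmain
  rw [hmain]
  have hbuf := buf_slice fw fw 0 0 le_rfl rfl
  simp only [List.take_zero, List.drop_nil] at hbuf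
  rw [hbuf]
  simp

-- ===== VERDICT (by name: the statement is the Claim_ definition above) =====
theorem tokenize_spec : Claim_equal_tokenize := by
  intro s _
  show tokenize s = tokenize_alt s
  simp only [tokenize, tokenize_alt]
  rw [fold_replace]
  exact core _
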